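-- pv_equiv track=rewrite | github.com/programiranje3/p2-2024v | lab3/lab3.py | string_stats
-- ===== SOURCE A (Python) =====
-- from collections import defaultdict
--
-- def string_stats(s):
--     # Opcija 1 za kreiranje instance recnika
--     # d = {'letters_cnt': 0,
--     #      'digits_cnt': 0,
--     #      'punct_cnt': 0}
--     # Opcija 2
--     d = defaultdict(int)
--     for ch in s:
--         if ch.isalpha():
--             d['letters_cnt'] += 1
--         elif ch.isdigit():
--             d['digits_cnt'] += 1
--         elif ch in '.,!?;:':
--             d['punct_cnt'] += 1
--     return dict(d)
-- ===== SOURCE B (Python) =====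
-- def _cat(ch):
--     if ch.isalpha():
--         return 'letters_cnt'
--     if ch.isdigit():
--         return 'digits_cnt'
--     if ch in '.,!?;:':
--         return 'punct_cnt'
--     return None
--
-- def string_stats(s):
--     # phase 1: which categories occur, in first-occurrence order
--     keys = dict.fromkeys(k for k in map(_cat, s) if k is not None)
--     # phase 2: one dedicated counting scan per occurring category
--     return {k: sum(1 for ch in s if _cat(ch) == k) for k in keys}
-- ===== Notes on version B (the rewrite author's own statement) =====
-- stated objective: alternative
-- what changed: Replaced A's single fused loop that increments running counts in a dict by a two-phase algorithm: one pass collects the distinct category keys in first-occurrence order, then each key's count is computed by its own dedicated filtered scan of the string.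
import Mathlib
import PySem

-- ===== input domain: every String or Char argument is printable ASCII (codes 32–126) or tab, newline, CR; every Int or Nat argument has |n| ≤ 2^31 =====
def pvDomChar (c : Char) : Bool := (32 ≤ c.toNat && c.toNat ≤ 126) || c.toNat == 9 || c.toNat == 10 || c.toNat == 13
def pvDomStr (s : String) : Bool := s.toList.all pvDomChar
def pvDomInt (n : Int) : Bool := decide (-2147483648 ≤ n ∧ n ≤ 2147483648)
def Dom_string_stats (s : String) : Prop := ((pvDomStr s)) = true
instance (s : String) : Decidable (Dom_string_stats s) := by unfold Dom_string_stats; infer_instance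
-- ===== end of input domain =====

-- B replaces A's fused count-as-you-go dict loop by a two-phase algorithm: collect the distinct category keys in first-occurrence order, then count each key with its own scan (alternative decomposition, same result).

-- ===== PORT A =====
-- literal port of A: defaultdict(int) loop with an if/elif chain; d[k] += 1 is Dict.modify k 0 (·+1)
def string_stats (s : String) : List (String × Int) :=
  (s.toList.foldl
    (fun d ch =>
      if PySem.Chars.isalpha ch then d.modify "letters_cnt" 0 (· + 1)
      else if PySem.Chars.isdigit ch then d.modify "digits_cnt" 0 (· + 1)
      else if ['.', ',', '!', '?', ';', ':'].contains ch then d.modify "punct_cnt" 0 (· + 1)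
      else d)
    PySem.Dict.empty).items

-- ===== PORT B =====
-- helper _cat from Source B
def pvCat (ch : Char) : Option String :=
  if PySem.Chars.isalpha ch then some "letters_cnt"
  else if PySem.Chars.isdigit ch then some "digits_cnt"
  else if ['.', ',', '!', '?', ';', ':'].contains ch then some "punct_cnt"
  else none

-- literal port of B: keys = dict.fromkeys(non-None categories); then per-key filtered counting scan
def string_stats_alt (s : String) : List (String × Int) :=
  let keys := PySem.List.dedup (s.toList.filterMap pvCat)
  keys.map (fun k => (k, (s.toList.countP (fun ch => pvCat ch == some k) : Int)))

-- ===== PRECONDITION & SPEC =====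
def Spec_string_stats (s : String) (out : List (String × Int)) : Prop := out = string_stats_alt s
instance (s : String) (out : List (String × Int)) : Decidable (Spec_string_stats s out) := by unfold Spec_string_stats; infer_instance

-- ===== CLAIM =====
def Claim_equal_string_stats : Prop := ∀ (s : String), Dom_string_stats s → Spec_string_stats s (string_stats s)

-- ===== LEMMAS AND PROOFS =====

-- A's branching step is, per character, exactly "modify by the category label (or skip)".
theorem pv_step_eq (d : PySem.Dict String Int) (ch : Char) :
    (if PySem.Chars.isalpha ch then d.modify "letters_cnt" 0 (· + 1)
     else if PySem.Chars.isdigit ch then d.modify "digits_cnt" 0 (· + 1)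
     else if ['.', ',', '!', '?', ';', ':'].contains ch then d.modify "punct_cnt" 0 (· + 1)
     else d)
    = (match pvCat ch with
       | some k => d.modify k 0 (· + 1)
       | none => d) := by
  unfold pvCat; split_ifs <;> rfl

-- hence A's fold is the fold of Counter over the category labels
theorem pv_foldl_eq (l : List Char) (d : PySem.Dict String Int) :
    l.foldl
      (fun d ch =>
        if PySem.Chars.isalpha ch then d.modify "letters_cnt" 0 (· + 1)
        else if PySem.Chars.isdigit ch then d.modify "digits_cnt" 0 (· + 1)
        else if ['.', ',', '!', '?', ';', ':'].contains ch then d.modify "punct_cnt" 0 (· + 1)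
        else d)
      d
    = (l.filterMap pvCat).foldl (fun d x => d.modify x 0 (· + 1)) d := by
  induction l generalizing d with
  | nil => rfl
  | cons ch t ih =>
    rw [List.foldl_cons, List.filterMap_cons, pv_step_eq]
    cases pvCat ch <;> simp only [List.foldl_cons] <;> exact ih _

-- counting a label in the filterMap equals a filtered count over the characters
theorem pv_count_filterMap (l : List Char) (k : String) :
    (l.filterMap pvCat).count k = l.countP (fun ch => pvCat ch == some k) := by
  induction l with
  | nil => rfl
  | cons ch t ih =>
    rw [List.filterMap_cons, List.countP_cons]
    cases h : pvCat ch with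
    | none => simp [ih]
    | some k' =>
      by_cases hk : k' = k
      · subst hk; simp [ih]
      · simp [hk, ih]

-- ===== VERDICT =====
theorem string_stats_spec : Claim_equal_string_stats := by
  intro s _
  unfold Spec_string_stats string_stats string_stats_alt
  rw [pv_foldl_eq, ← PySem.Dict.counter_eq_foldl, PySem.Dict.items_counter]
  simp [PySem.List.dedup_eq_ofList, pv_count_filterMap]
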